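-- pv_equiv track=rewrite | github.com/marcin96/wordmonkey | crawler/WordSpyder.py | removeTrash
-- ===== SOURCE A (Python) =====
-- def removeTrash(data):
--     '''
--     Removes all tags and blue data.
--     '''
--     tags = "bpih"
--     for i in tags:
--         data = data.replace("<"+i+">","")
--         data = data.replace("</"+i+">","")
--     trash = "=)£!:_;<>{}[]_-+-*/.,\?!\"\'@#$+-*/"
--     for i in trash:
--         data = data.replace(i,"")
--     return data
-- ===== SOURCE B (Python) =====
-- def removeTrash(data):
--     '''
--     Removes all tags and blue data.
--     '''
--     for tag in ("<b>", "</b>", "<p>", "</p>", "<i>", "</i>", "<h>", "</h>"):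
--         data = data.replace(tag, "")
--     trash = set("=)\u00a3!:_;<>{}[]_-+-*/.,\\?!\"'@#$+-*/")
--     return "".join(c for c in data if c not in trash)
-- ===== Notes on version B (the rewrite author's own statement) =====
-- stated objective: simpler
-- what changed: The tag-removal replaces are kept, but the ~34 sequential per-character str.replace passes over the data (one full scan per trash character) are replaced by a single filtering pass over the data with a precomputed set of trash characters.
import Mathlib
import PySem

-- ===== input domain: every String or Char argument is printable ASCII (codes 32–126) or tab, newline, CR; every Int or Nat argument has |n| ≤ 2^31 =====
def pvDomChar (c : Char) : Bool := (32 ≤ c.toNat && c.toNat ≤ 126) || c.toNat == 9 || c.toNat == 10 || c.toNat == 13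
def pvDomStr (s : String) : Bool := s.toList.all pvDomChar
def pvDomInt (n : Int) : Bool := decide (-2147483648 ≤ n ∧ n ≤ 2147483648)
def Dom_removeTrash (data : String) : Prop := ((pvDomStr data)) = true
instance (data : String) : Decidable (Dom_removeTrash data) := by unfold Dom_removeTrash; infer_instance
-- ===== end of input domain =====

-- B keeps the tag-removal replaces but collapses the per-character replace passes over the
-- trash string into one single filtering pass over the data with a set (simpler, single-pass).

-- ===== PORT A =====
def removeTrash (data : String) : String :=
  let tags := "bpih"
  let data := tags.toList.foldl (fun d i =>
    let d := PySem.Str.replace d ("<" ++ String.singleton i ++ ">") ""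
    PySem.Str.replace d ("</" ++ String.singleton i ++ ">") "") data
  let trash := "=)£!:_;<>{}[]_-+-*/.,\\?!\"'@#$+-*/"
  trash.toList.foldl (fun d i => PySem.Str.replace d (String.singleton i) "") data

-- ===== PORT B =====
def removeTrash_alt (data : String) : String :=
  let data := ["<b>", "</b>", "<p>", "</p>", "<i>", "</i>", "<h>", "</h>"].foldl
    (fun d t => PySem.Str.replace d t "") data
  let trash : PySem.Set Char := PySem.Set.ofList "=)£!:_;<>{}[]_-+-*/.,\\?!\"'@#$+-*/".toList
  String.ofList (data.toList.filter (fun c => !(PySem.Set.contains trash c)))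

-- ===== PRECONDITION & SPEC =====
def Spec_removeTrash (data : String) (out : String) : Prop := out = removeTrash_alt data
instance (data : String) (out : String) : Decidable (Spec_removeTrash data out) := by unfold Spec_removeTrash; infer_instance

-- ===== CLAIM (what is proved, stated in full; the proofs are below) =====
def Claim_equal_removeTrash : Prop := ∀ (data : String), Dom_removeTrash data → Spec_removeTrash data (removeTrash data)

-- ===== LEMMAS AND PROOFS =====

-- Python's s.replace(c, "") for a single character c is exactly filtering c out.
theorem replace_go_single (c : Char) (fuel : Nat) (l acc : List Char)
    (h : l.length ≤ fuel) :
    PySem.Chars.replace.go [c] [] fuel l acc = acc.reverse ++ l.filter (· != c) := by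
  induction fuel generalizing l acc with
  | zero =>
    cases l with
    | nil => simp [PySem.Chars.replace.go]
    | cons x t => simp at h
  | succ n ih =>
    cases l with
    | nil => simp [PySem.Chars.replace.go]
    | cons x t =>
      simp only [List.length_cons, Nat.succ_le_succ_iff] at h
      by_cases hx : x = c
      · subst hx
        have hpre : List.isPrefixOf [x] (x :: t) = true := by
          simp [List.isPrefixOf]
        simp only [PySem.Chars.replace.go, hpre, if_pos]
        rw [ih _ _ (by simpa using h)]
        simp
      · have hpre : List.isPrefixOf [c] (x :: t) = false := by
          simp [List.isPrefixOf]
          exact fun h' => hx h'.symm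
        simp only [PySem.Chars.replace.go, hpre]
        rw [ih _ _ h]
        simp [hx]

theorem replace_single (c : Char) (l : List Char) :
    PySem.Chars.replace l [c] [] = l.filter (· != c) := by
  have h := replace_go_single c l.length l [] le_rfl
  simpa [PySem.Chars.replace] using h

theorem contains_ofList_char (xs : List Char) (x : Char) :
    PySem.Set.contains (PySem.Set.ofList xs) x = xs.contains x := by
  by_cases h : x ∈ xs <;>
    simp [PySem.Set.contains, h, PySem.Set.mem_ofList]

-- Folding single-character str.replace removals over a list of characters = one filter by membership.
theorem trash_phase (cs : List Char) (s : String) :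
    cs.foldl (fun d i => PySem.Str.replace d (String.singleton i) "") s
      = String.ofList (s.toList.filter (fun x => !(cs.contains x))) := by
  induction cs generalizing s with
  | nil => simp
  | cons c rest ih =>
    rw [List.foldl_cons, ih]
    have h1 : (PySem.Str.replace s (String.singleton c) "").toList
        = s.toList.filter (· != c) := by
      rw [PySem.Str.toList_replace,
          show (String.singleton c).toList = [c] by simp,
          show ("" : String).toList = [] from rfl]
      exact replace_single c s.toList
    rw [h1, List.filter_filter]
    congr 1
    apply List.filter_congr
    intro x _
    by_cases hx : x = c <;> simp [hx]

theorem removeTrash_spec_aux (data : String) :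
    removeTrash data = removeTrash_alt data := by
  unfold removeTrash removeTrash_alt
  dsimp only
  rw [show ("bpih").toList = ['b','p','i','h'] from rfl]
  simp only [List.foldl_cons, List.foldl_nil]
  rw [show ("<" ++ String.singleton 'b' ++ ">") = "<b>" from rfl,
      show ("</" ++ String.singleton 'b' ++ ">") = "</b>" from rfl,
      show ("<" ++ String.singleton 'p' ++ ">") = "<p>" from rfl,
      show ("</" ++ String.singleton 'p' ++ ">") = "</p>" from rfl,
      show ("<" ++ String.singleton 'i' ++ ">") = "<i>" from rfl,
      show ("</" ++ String.singleton 'i' ++ ">") = "</i>" from rfl,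
      show ("<" ++ String.singleton 'h' ++ ">") = "<h>" from rfl,
      show ("</" ++ String.singleton 'h' ++ ">") = "</h>" from rfl]
  rw [trash_phase]
  simp only [contains_ofList_char]

-- ===== VERDICT (by name: the statement is the Claim_ definition above) =====
theorem removeTrash_spec : Claim_equal_removeTrash := by
  intro data _
  exact removeTrash_spec_aux data
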